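-- pv_equiv track=rewrite | github.com/PuneetChandel/python | maxsublist.py | chooseNumbers
-- ===== SOURCE A (Python) =====
-- def chooseNumbers(a):
--     arr1=[]
--     result=[]
--     a.sort()
--     for x in range(0,len(a)):
--         for y in range(x,len(a)):
--             if abs(a[x]-a[y])<=1:
--                 if len(arr1)>0:
--                     if abs(min(arr1)-a[y])<=1:
--                          arr1.append(a[y])
--                 else:
--                     arr1.append(a[y])
--
--         if len(arr1)>len(result) or x==0:
--             result=arr1
--         arr1=[]
--     return len(result)
-- ===== SOURCE B (Python) =====
-- def chooseNumbers(a):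
--     # Count frequencies once; the answer is max over values v of cnt[v] + cnt[v+1].
--     # (Return value only: A sorts its argument in place, B leaves it untouched.)
--     cnt = {}
--     for x in a:
--         cnt[x] = cnt.get(x, 0) + 1
--     best = 0
--     for v, c in cnt.items():
--         best = max(best, c + cnt.get(v + 1, 0))
--     return best
-- ===== Notes on version B (the rewrite author's own statement) =====
-- stated objective: faster
-- what changed: Replaced the sort plus doubly-nested index scan (rebuilding and min-scanning a candidate list for every start index) by a single frequency-count pass and one pass over the distinct values taking max(cnt[v]+cnt[v+1]).
import Mathlib
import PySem

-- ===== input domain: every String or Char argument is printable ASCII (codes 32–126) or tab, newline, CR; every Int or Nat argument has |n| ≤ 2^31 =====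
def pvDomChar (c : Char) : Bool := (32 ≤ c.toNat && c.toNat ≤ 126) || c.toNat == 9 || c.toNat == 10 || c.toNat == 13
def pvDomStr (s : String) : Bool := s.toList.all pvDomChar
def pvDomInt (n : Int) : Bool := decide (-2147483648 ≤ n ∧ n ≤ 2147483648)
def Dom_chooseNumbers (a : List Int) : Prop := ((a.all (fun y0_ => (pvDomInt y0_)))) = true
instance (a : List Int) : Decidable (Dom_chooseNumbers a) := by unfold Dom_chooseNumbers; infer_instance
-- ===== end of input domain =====

-- B replaces A's sort + doubly-nested index scan by one frequency count and a pass over distinct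
-- values taking max(cnt[v]+cnt[v+1]); return-value equivalence only (A sorts its argument in place, B does not).

-- ===== PORT A =====
-- body of A's inner loop over y: the y-th element is passed as v, the fixed a[x] as m
def pvInnerBody (m : Int) (arr1 : List Int) (v : Int) : List Int :=
  if |m - v| ≤ 1 then
    if PySem.List.len arr1 > 0 then
      if |((PySem.List.min? arr1 (fun w => w)).getD 0) - v| ≤ 1 then arr1 ++ [v] else arr1
    else arr1 ++ [v]
  else arr1

def chooseNumbers (a : List Int) : Int :=
  let s := PySem.List.sorted a (fun v => v) false   -- a.sort()
  let n := PySem.List.len s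
  let result := (PySem.List.pyRange 0 n 1).foldl (fun result x =>
    let arr1 := (PySem.List.pyRange x n 1).foldl
      (fun arr1 y => pvInnerBody (PySem.List.pyGetD s x 0) arr1 (PySem.List.pyGetD s y 0)) []
    if PySem.List.len arr1 > PySem.List.len result ∨ x = 0 then arr1 else result) ([] : List Int)
  PySem.List.len result

-- ===== PORT B =====
def chooseNumbers_alt (a : List Int) : Int :=
  let cnt : PySem.Dict Int Int := a.foldl (fun d x => d.modify x 0 (· + 1)) PySem.Dict.empty
  cnt.items.foldl (fun best p => max best (p.2 + cnt.getD (p.1 + 1) 0)) 0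

-- ===== PRECONDITION & SPEC =====
def Spec_chooseNumbers (a : List Int) (out : Int) : Prop := out = chooseNumbers_alt a
instance (a : List Int) (out : Int) : Decidable (Spec_chooseNumbers a out) := by unfold Spec_chooseNumbers; infer_instance

-- ===== CLAIM (what is proved, stated in full; the proofs are below) =====
def Claim_equal_chooseNumbers : Prop := ∀ (a : List Int), Dom_chooseNumbers a → Spec_chooseNumbers a (chooseNumbers a)

-- ===== LEMMAS AND PROOFS =====

-- the length (as Int) of the group A builds when the outer loop starts at index k of the sorted list
def pvL (s : List Int) (k : Nat) : Int := ((s.drop k).countP (fun v => decide (v ≤ s.getD k 0 + 1)) : Int)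

-- the candidate value B computes for value v
def pvF (a : List Int) (v : Int) : Int := (a.count v : Int) + (a.count (v + 1) : Int)

theorem pv_foldl_max_le {α : Type} (xs : List α) (f : α → Int) (init c : Int)
    (h0 : init ≤ c) (h : ∀ x ∈ xs, f x ≤ c) :
    xs.foldl (fun acc x => max acc (f x)) init ≤ c := by
  induction xs generalizing init with
  | nil => exact h0
  | cons x t ih =>
    exact ih (max init (f x)) (max_le h0 (h x (by simp))) (fun y hy => h y (by simp [hy]))

theorem pv_B_closed (a : List Int) :
    chooseNumbers_alt a = (PySem.Set.ofList a).foldl (fun best v => max best (pvF a v)) 0 := by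
  unfold chooseNumbers_alt
  rw [← PySem.Dict.counter_eq_foldl]
  show List.foldl _ 0 (PySem.Dict.counter a).items = _
  rw [PySem.Dict.items_counter, List.foldl_map]
  simp [PySem.Dict.getD_counter, pvF]

theorem pv_tailfold (m : Int) (t : List Int) :
    ∀ acc : List Int, (∀ v ∈ t, m ≤ v) → (∀ w ∈ acc, m ≤ w) → m ∈ acc →
    t.foldl (pvInnerBody m) acc = acc ++ t.filter (fun v => decide (v ≤ m + 1)) := by
  induction t with
  | nil => intro acc _ _ _; simp
  | cons v t' ih =>
    intro acc ht hacc hm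
    have hmv : m ≤ v := ht v (by simp)
    have hne : acc ≠ [] := by intro h; subst h; simp at hm
    by_cases hle : v ≤ m + 1
    · have hstep : pvInnerBody m acc v = acc ++ [v] := by
        unfold pvInnerBody
        have h1 : |m - v| ≤ 1 := by rw [abs_le]; omega
        have hlen : PySem.List.len acc > 0 := by
          simp only [PySem.List.len_eq]
          exact_mod_cast List.length_pos_iff.mpr hne
        have hmin : (PySem.List.min? acc (fun w => w)).getD 0 = m := by
          obtain ⟨μ, hμ⟩ : ∃ μ, PySem.List.min? acc (fun w => w) = some μ := by
            cases hmo : PySem.List.min? acc (fun w => w) with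
            | none => exact absurd ((PySem.List.min?_eq_none_iff _ _).mp hmo) hne
            | some μ => exact ⟨μ, rfl⟩
          have h2 := hacc μ (PySem.List.min?_mem hμ)
          have h3 := PySem.List.min?_isMin hμ m hm
          rw [hμ]
          simp only [Option.getD_some]
          omega
        rw [if_pos h1, if_pos hlen, hmin, if_pos h1]
      rw [List.foldl_cons, hstep,
        ih (acc ++ [v]) (fun w hw => ht w (by simp [hw]))
          (by intro w hw; rcases List.mem_append.mp hw with h | h
              · exact hacc w h
              · simp at h; omega)
          (by simp [hm])]
      simp [hle]
    · have hstep : pvInnerBody m acc v = acc := by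
        unfold pvInnerBody
        have h1 : ¬(|m - v| ≤ 1) := by rw [abs_le]; omega
        rw [if_neg h1]
      rw [List.foldl_cons, hstep,
        ih acc (fun w hw => ht w (by simp [hw])) hacc hm]
      simp [hle]

theorem pv_inner (s : List Int) (hp : s.Pairwise (· ≤ ·)) (k : Nat) (hk : k < s.length) :
    (PySem.List.pyRange (k : Int) ((s.length : Int)) 1).foldl
      (fun arr1 y => pvInnerBody (PySem.List.pyGetD s (k : Int) 0) arr1 (PySem.List.pyGetD s y 0)) []
    = (s.drop k).filter (fun v => decide (v ≤ s.getD k 0 + 1)) := by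
  have h0 : (0 : Int) ≤ (k : Int) := Int.natCast_nonneg k
  rw [PySem.List.foldl_pyRange_pyGetD' s 0
    (pvInnerBody (PySem.List.pyGetD s (k : Int) 0)) ([]) h0]
  have hm : PySem.List.pyGetD s (k : Int) 0 = s[k] := by
    simp [PySem.List.pyGetD_natCast, List.getD_eq_getElem?_getD, hk]
  have hgetD : s.getD k 0 = s[k] := by
    simp [List.getD_eq_getElem?_getD, hk]
  have htoNat : ((k : Int)).toNat = k := Int.toNat_natCast k
  rw [hm, htoNat, hgetD]
  have hdrop : s.drop k = s[k] :: s.drop (k + 1) := List.drop_eq_getElem_cons hk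
  rw [hdrop]
  have hpd : (s[k] :: s.drop (k + 1)).Pairwise (· ≤ ·) := by
    rw [← hdrop]; exact hp.sublist (List.drop_sublist k s)
  have hrest : ∀ v ∈ s.drop (k + 1), s[k] ≤ v := (List.pairwise_cons.mp hpd).1
  have hfirst : pvInnerBody s[k] [] s[k] = [s[k]] := by
    unfold pvInnerBody
    rw [if_pos (by simp), if_neg (by simp [PySem.List.len_eq])]
    simp
  rw [List.foldl_cons, hfirst,
    pv_tailfold s[k] (s.drop (k + 1)) [s[k]] hrest (by simp) (by simp)]
  rw [List.filter_cons]
  simp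

theorem pv_outer (s : List Int) (hp : s.Pairwise (· ≤ ·)) (K : Nat) (hK : K ≤ s.length) :
    PySem.List.len ((PySem.List.pyRange 0 (K : Int) 1).foldl
      (fun result x =>
        let arr1 := (PySem.List.pyRange x ((s.length : Int)) 1).foldl
          (fun arr1 y => pvInnerBody (PySem.List.pyGetD s x 0) arr1 (PySem.List.pyGetD s y 0)) []
        if PySem.List.len arr1 > PySem.List.len result ∨ x = 0 then arr1 else result) ([] : List Int))
    = (List.range K).foldl (fun acc k => max acc (pvL s k)) 0 := by
  induction K with
  | zero => simp [PySem.List.pyRange_one_eq_nil, PySem.List.len_eq]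
  | succ K ih =>
    have hK' : K ≤ s.length := Nat.le_of_succ_le hK
    have hcast : ((K + 1 : Nat) : Int) = (K : Int) + 1 := by push_cast; ring
    rw [hcast, PySem.List.pyRange_one_succ_right (by positivity), List.range_succ,
      List.foldl_append, List.foldl_append, List.foldl_cons, List.foldl_nil,
      List.foldl_cons, List.foldl_nil]
    have hinner := pv_inner s hp K (Nat.lt_of_succ_le hK)
    simp only [hinner]
    set R := (PySem.List.pyRange 0 (K : Int) 1).foldl
      (fun result x =>
        let arr1 := (PySem.List.pyRange x ((s.length : Int)) 1).foldl
          (fun arr1 y => pvInnerBody (PySem.List.pyGetD s x 0) arr1 (PySem.List.pyGetD s y 0)) []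
        if PySem.List.len arr1 > PySem.List.len result ∨ x = 0 then arr1 else result) ([] : List Int) with hR
    set c := (List.range K).foldl (fun acc k => max acc (pvL s k)) 0 with hc
    have hlenf : PySem.List.len ((s.drop K).filter (fun v => decide (v ≤ s.getD K 0 + 1))) = pvL s K := by
      simp [PySem.List.len_eq, pvL, List.countP_eq_length_filter]
    have hc0 : 0 ≤ c := (PySem.List.le_foldl_max_int (List.range K) (pvL s) 0).1
    have hLpos : 0 ≤ pvL s K := by simp [pvL]
    have hRc : PySem.List.len R = c := ih hK'
    split_ifs with h
    · rw [hlenf]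
      rcases h with h | h
      · rw [hlenf, hRc] at h; omega
      · have hK0 : K = 0 := by exact_mod_cast h
        subst hK0
        simp only [List.range_zero, List.foldl_nil] at hc
        omega
    · obtain ⟨h1, h2⟩ := not_or.mp h
      rw [hlenf, hRc] at h1
      rw [hRc]
      omega

theorem pv_A_closed (a : List Int) :
    chooseNumbers a = (List.range (PySem.List.sorted a (fun v => v) false).length).foldl
      (fun acc k => max acc (pvL (PySem.List.sorted a (fun v => v) false) k)) 0 := by
  unfold chooseNumbers
  have hp : (PySem.List.sorted a (fun v => v) false).Pairwise (· ≤ ·) :=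
    PySem.List.sorted_pairwise a (fun v => v)
  simp only [PySem.List.len_eq]
  exact pv_outer (PySem.List.sorted a (fun v => v) false) hp
    (PySem.List.sorted a (fun v => v) false).length le_rfl

theorem pv_countP_split (m : Int) (t : List Int) (h : ∀ v ∈ t, m ≤ v) :
    t.countP (fun v => decide (v ≤ m + 1)) = t.count m + t.count (m + 1) := by
  induction t with
  | nil => simp
  | cons v t' ih =>
    have hv := h v (by simp)
    have ih' := ih (fun w hw => h w (by simp [hw]))
    by_cases hle : v ≤ m + 1
    · have : v = m ∨ v = m + 1 := by omega
      rcases this with h1 | h1 <;> subst h1 <;>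
        simp [ih'] <;> omega
    · have h1 : v ≠ m := by omega
      have h2 : v ≠ m + 1 := by omega
      simp [ih', hle, h1, h2]

theorem pv_upper (a : List Int) (k : Nat) (hk : k < (PySem.List.sorted a (fun v => v) false).length) :
    pvL (PySem.List.sorted a (fun v => v) false) k
      ≤ pvF a ((PySem.List.sorted a (fun v => v) false).getD k 0) := by
  set s := PySem.List.sorted a (fun v => v) false with hs
  have hp : s.Pairwise (· ≤ ·) := PySem.List.sorted_pairwise a (fun v => v)
  have hgetD : s.getD k 0 = s[k] := by simp [List.getD_eq_getElem?_getD, hk]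
  have hdrop : s.drop k = s[k] :: s.drop (k + 1) := List.drop_eq_getElem_cons hk
  have hall : ∀ v ∈ s.drop k, s[k] ≤ v := by
    have hpd : (s[k] :: s.drop (k + 1)).Pairwise (· ≤ ·) := by
      rw [← hdrop]; exact hp.sublist (List.drop_sublist k s)
    rw [hdrop]
    intro v hv
    rcases List.mem_cons.mp hv with h | h
    · omega
    · exact (List.pairwise_cons.mp hpd).1 v h
  have hsplit := pv_countP_split s[k] (s.drop k) hall
  have h1 : (s.drop k).count s[k] ≤ a.count s[k] := by
    calc (s.drop k).count s[k] ≤ s.count s[k] := List.Sublist.count_le _ (List.drop_sublist k s)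
      _ = a.count s[k] := (PySem.List.sorted_perm a (fun v => v) false).count_eq s[k]
  have h2 : (s.drop k).count (s[k] + 1) ≤ a.count (s[k] + 1) := by
    calc (s.drop k).count (s[k] + 1) ≤ s.count (s[k] + 1) :=
        List.Sublist.count_le _ (List.drop_sublist k s)
      _ = a.count (s[k] + 1) := (PySem.List.sorted_perm a (fun v => v) false).count_eq _
  simp only [pvL, pvF, hgetD, hsplit]
  omega

theorem pv_lower (a : List Int) (v : Int) (hv : v ∈ a) :
    ∃ k, k < (PySem.List.sorted a (fun v => v) false).length ∧
      pvF a v ≤ pvL (PySem.List.sorted a (fun v => v) false) k := by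
  set s := PySem.List.sorted a (fun v => v) false with hs
  have hp : s.Pairwise (· ≤ ·) := PySem.List.sorted_pairwise a (fun v => v)
  have hvs : v ∈ s := (PySem.List.mem_sorted _ _ _ _).mpr hv
  set q : Int → Bool := fun w => decide (w < v) with hq
  set pre := s.takeWhile q with hpre
  set d := s.dropWhile q with hd
  have hspl : pre ++ d = s := List.takeWhile_append_dropWhile
  have hvpre : v ∉ pre := by
    intro hmem
    have := List.mem_takeWhile_imp hmem
    simp [hq] at this
  have hvd : v ∈ d := by
    rcases List.mem_append.mp (by rw [hspl]; exact hvs) with h | h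
    · exact absurd h hvpre
    · exact h
  have hdne : d ≠ [] := by intro h; rw [h] at hvd; simp at hvd
  obtain ⟨w, d', hwd⟩ := List.exists_cons_of_ne_nil hdne
  have hpd : d.Pairwise (· ≤ ·) := hp.sublist (List.dropWhile_sublist q)
  have hwv : w = v := by
    have hnw : q w = false := by
      have h1 : List.dropWhile q s = w :: d' := by rw [← hd]; exact hwd
      have h2 := List.head_dropWhile_not q (l := s) (by rw [h1]; simp)
      simp only [h1, List.head_cons] at h2
      exact h2
    have hvw : v ≤ w := by simp [hq] at hnw; omega
    have hwle : w ≤ v := by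
      rw [hwd] at hpd hvd
      rcases List.mem_cons.mp hvd with h | h
      · omega
      · exact (List.pairwise_cons.mp hpd).1 v h
    omega
  refine ⟨pre.length, ?_, ?_⟩
  · have : s.length = pre.length + d.length := by rw [← hspl]; simp
    have : d.length ≥ 1 := by rw [hwd]; simp
    omega
  · have hdropk : s.drop pre.length = d := by rw [← hspl, List.drop_left]
    have hgetD : s.getD pre.length 0 = v := by
      rw [← hspl, hwd, ← hwv]
      rw [List.getD_eq_getElem?_getD, List.getElem?_append_right (le_refl _)]
      simp
    have hall : ∀ u ∈ d, v ≤ u := by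
      rw [hwd]
      intro u hu
      rcases List.mem_cons.mp hu with h | h
      · omega
      · have := (List.pairwise_cons.mp (by rw [hwd] at hpd; exact hpd)).1 u h
        omega
    have hsplit := pv_countP_split v d hall
    have hc1 : a.count v = d.count v := by
      have : s.count v = pre.count v + d.count v := by rw [← hspl, List.count_append]
      have hz : pre.count v = 0 := List.count_eq_zero.mpr hvpre
      have hperm := (PySem.List.sorted_perm a (fun v => v) false).count_eq v
      rw [← hs] at hperm
      omega
    have hc2 : a.count (v + 1) = d.count (v + 1) := by
      have hnp : (v + 1) ∉ pre := by
        intro hmem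
        have := List.mem_takeWhile_imp hmem
        simp [hq] at this
      have : s.count (v + 1) = pre.count (v + 1) + d.count (v + 1) := by
        rw [← hspl, List.count_append]
      have hz : pre.count (v + 1) = 0 := List.count_eq_zero.mpr hnp
      have hperm := (PySem.List.sorted_perm a (fun v => v) false).count_eq (v + 1)
      rw [← hs] at hperm
      omega
    simp only [pvL, pvF, hdropk, hgetD, hsplit, hc1, hc2]
    omega

-- ===== VERDICT (by name: the statement is the Claim_ definition above) =====
theorem chooseNumbers_spec : Claim_equal_chooseNumbers := by
  intro a _
  unfold Spec_chooseNumbers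
  rw [pv_A_closed, pv_B_closed]
  apply le_antisymm
  · apply pv_foldl_max_le
    · exact (PySem.List.le_foldl_max_int (PySem.Set.ofList a) (pvF a) 0).1
    · intro k hkmem
      have hk : k < (PySem.List.sorted a (fun v => v) false).length := List.mem_range.mp hkmem
      refine le_trans (pv_upper a k hk) ?_
      have hmem : (PySem.List.sorted a (fun v => v) false).getD k 0 ∈ a := by
        rw [List.getD_eq_getElem?_getD, List.getElem?_eq_getElem hk]
        exact (PySem.List.mem_sorted _ _ _ _).mp (List.getElem_mem hk)
      exact (PySem.List.le_foldl_max_int (PySem.Set.ofList a) (pvF a) 0).2 _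
        ((PySem.Set.mem_ofList _ _).mpr hmem)
  · apply pv_foldl_max_le
    · exact (PySem.List.le_foldl_max_int
        (List.range (PySem.List.sorted a (fun v => v) false).length)
        (pvL (PySem.List.sorted a (fun v => v) false)) 0).1
    · intro v hv
      obtain ⟨k, hk, hle⟩ := pv_lower a v ((PySem.Set.mem_ofList _ _).mp hv)
      exact le_trans hle ((PySem.List.le_foldl_max_int
        (List.range (PySem.List.sorted a (fun v => v) false).length)
        (pvL (PySem.List.sorted a (fun v => v) false)) 0).2 k (List.mem_range.mpr hk))
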